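-- pv_equiv track=rewrite | github.com/jinho7/CodingTest_Python-Java | 프로그래머스/2/84512. 모음 사전/모음 사전.py | solution
-- ===== SOURCE A (Python) =====
-- def solution(word):
--     answer = 0
--     # 5진수?
--     # A 0, E 1, I 2, O 3, U 4순서
--     alpha_to_num = {'A': 0, 'E': 1, 'I': 2, 'O': 3, 'U': 4}
--     # 자리에 대해 x 5, x 5^2 ... 가중치
--     # 마지막 자리에서 알파벳이 하나 올라가면 1개의 새로운 단어가 생김
--     # 네번째 -> 5^1 + (5^0) ... // 첫째자리 5^0 더해서
--     # 첫 째 자리에서 알파벳 하나 올라가면 5^4 + 5^3 + 5^2 + 5^1 + 5^0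
--     weights = []
--     temp = 0
--     for i in range(5):
--         temp += 5**i
--         weights.append(temp)
--     weights.reverse()
--
--     for index, item in enumerate(word):
--         answer += alpha_to_num[item] * weights[index] + 1
--         # 본인 차례도 세줘야해서 +1
--
--     return answer
-- ===== SOURCE B (Python) =====
-- def solution(word):
--     words = ['']
--
--     def dfs(prefix):
--         words.append(prefix)
--         if len(prefix) < 5:
--             for c in "AEIOU":
--                 dfs(prefix + c)
--
--     for c in "AEIOU":
--         dfs(c)
--     return words.index(word)
-- ===== Notes on version B (the rewrite author's own statement) =====
-- stated objective: alternative
-- what changed: Replaces A's closed-form positional-weight arithmetic (precomputed base-5 weights summed per character) with explicit DFS generation of the whole vowel dictionary in lexicographic order followed by a linear list.index search.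
import Mathlib
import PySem

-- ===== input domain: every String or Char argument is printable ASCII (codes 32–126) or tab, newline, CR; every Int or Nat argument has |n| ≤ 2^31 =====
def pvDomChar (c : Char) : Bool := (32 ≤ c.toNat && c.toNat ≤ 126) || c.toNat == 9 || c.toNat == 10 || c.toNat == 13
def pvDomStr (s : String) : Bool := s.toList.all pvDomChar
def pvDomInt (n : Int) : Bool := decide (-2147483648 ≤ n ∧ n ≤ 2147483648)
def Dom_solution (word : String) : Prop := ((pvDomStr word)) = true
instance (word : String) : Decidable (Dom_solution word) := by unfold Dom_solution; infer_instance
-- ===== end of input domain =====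

-- B replaces A's positional base-5 weight arithmetic by DFS generation of the whole
-- vowel dictionary in lexicographic order plus a linear index search (alternative algorithm,
-- same return value on every input where A returns).

-- ===== PORT A =====
def alphaToNum : PySem.Dict Char Int :=
  PySem.Dict.ofList [('A', 0), ('E', 1), ('I', 2), ('O', 3), ('U', 4)]

-- the weights loop: temp += 5**i; weights.append(temp); then weights.reverse()
def weightsA : List Int :=
  (((PySem.List.pyRange 0 5 1).foldl
      (fun (st : Int × List Int) i =>
        (st.1 + (5:Int) ^ i.toNat, st.2 ++ [st.1 + (5:Int) ^ i.toNat]))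
      (0, [])).2).reverse

-- the answer loop; Option threads the KeyError (alpha_to_num[item]) and IndexError (weights[index])
def solution (word : String) : Int :=
  ((PySem.List.enumerate word.toList 0).foldl
      (fun (acc : Option Int) (p : Int × Char) =>
        acc.bind (fun a => (alphaToNum.get? p.2).bind (fun v =>
          (PySem.List.pyGet? weightsA p.1).map (fun w => a + v * w + 1))))
      (some 0)).getD 0

-- ===== PORT B =====
def vowelsB : List Char := ['A', 'E', 'I', 'O', 'U']

-- dfs(prefix): append prefix; if len(prefix) < 5 recurse on prefix+c.
-- fuel = 5 - len(prefix) makes the recursion structural (a totality guard only).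
def dfsB : Nat → List Char → List (List Char)
  | 0, p => [p]
  | n + 1, p => p :: vowelsB.flatMap (fun c => dfsB n (p ++ [c]))

def solution_alt (word : String) : Int :=
  let words : List (List Char) := [] :: vowelsB.flatMap (fun c => dfsB 4 [c])
  (((PySem.List.index? words word.toList).getD 0 : Nat) : Int)

-- ===== PRECONDITION & SPEC =====
-- Pre_ excludes exactly the inputs where A raises: a non-vowel character (KeyError) or
-- a word longer than 5 (IndexError); B raises ValueError there.
def Pre_solution (word : String) : Prop :=
  word.toList.all (fun c => c ∈ (['A', 'E', 'I', 'O', 'U'] : List Char)) = true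
    ∧ word.toList.length ≤ 5
instance (word : String) : Decidable (Pre_solution word) := by unfold Pre_solution; infer_instance

def pvWitness_solution : String := "EIO"

def Spec_solution (word : String) (out : Int) : Prop := out = solution_alt word
instance (word : String) (out : Int) : Decidable (Spec_solution word out) := by unfold Spec_solution; infer_instance

-- ===== CLAIM (what is proved, stated in full; the proofs are below) =====
def Claim_equal_solution : Prop :=
  ∀ (word : String), Dom_solution word → Pre_solution word → Spec_solution word (solution word)

-- ===== LEMMAS AND PROOFS =====

-- numeric value of a vowel
def valN (c : Char) : Nat :=
  if c = 'A' then 0 else if c = 'E' then 1 else if c = 'I' then 2 else if c = 'O' then 3 else 4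

-- size of a DFS subtree with the given fuel
def sizeN : Nat → Nat
  | 0 => 1
  | n + 1 => 1 + 5 * sizeN n

-- rank of a suffix inside a subtree with the given fuel
def rankN : Nat → List Char → Nat
  | _, [] => 0
  | 0, _ :: _ => 0
  | n + 1, c :: rest => 1 + valN c * sizeN n + rankN n rest

lemma length_dfsB (n : Nat) : ∀ p : List Char, (dfsB n p).length = sizeN n := by
  induction n with
  | zero => intro p; rfl
  | succ n ih =>
    intro p
    simp [dfsB, vowelsB, List.flatMap, sizeN, ih]
    omega

lemma prefix_of_mem_dfsB (n : Nat) : ∀ p l : List Char, l ∈ dfsB n p → p <+: l := by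
  induction n with
  | zero =>
    intro p l hl
    simp [dfsB] at hl
    exact hl ▸ List.prefix_refl p
  | succ n ih =>
    intro p l hl
    simp [dfsB] at hl
    rcases hl with rfl | ⟨c, _, hl⟩
    · exact List.prefix_refl _
    · exact List.IsPrefix.trans ⟨[c], rfl⟩ (ih (p ++ [c]) l hl)

lemma not_mem_dfsB_of_ne {c c' : Char} (h : c' ≠ c) (n : Nat) (p rest : List Char) :
    (p ++ c :: rest) ∉ dfsB n (p ++ [c']) := by
  intro hmem
  have hp := prefix_of_mem_dfsB n (p ++ [c']) (p ++ c :: rest) hmem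
  rcases hp with ⟨t, ht⟩
  rw [List.append_assoc] at ht
  have := List.append_cancel_left ht
  simp at this
  exact h this.1

lemma index?_append_right {α : Type} [BEq α] [LawfulBEq α] (l t : List α) (v : α) (hv : v ∉ l) :
    PySem.List.index? (l ++ t) v = (PySem.List.index? t v).map (· + l.length) := by
  induction l with
  | nil => simp
  | cons x xs ih =>
    simp at hv
    rw [List.cons_append, PySem.List.index?_cons_of_ne _ (Ne.symm hv.1), ih hv.2]
    cases PySem.List.index? t v with
    | none => simp
    | some k => simp; omega

lemma index_dfsB (n : Nat) : ∀ p rest : List Char, rest.length ≤ n →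
    (∀ c ∈ rest, c ∈ vowelsB) →
    PySem.List.index? (dfsB n p) (p ++ rest) = some (rankN n rest) := by
  induction n with
  | zero =>
    intro p rest hlen _
    have : rest = [] := List.eq_nil_of_length_eq_zero (Nat.le_zero.mp hlen)
    subst this
    rw [List.append_nil, show dfsB 0 p = [p] from rfl, PySem.List.index?_cons_self]
    rfl
  | succ n ih =>
    intro p rest hlen hall
    cases rest with
    | nil =>
      rw [List.append_nil,
        show dfsB (n + 1) p = p :: vowelsB.flatMap (fun c => dfsB n (p ++ [c])) from rfl,
        PySem.List.index?_cons_self]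
      rfl
    | cons c rest' =>
      have hne : p ≠ p ++ c :: rest' := by
        intro h; have := congrArg List.length h; simp at this
      rw [show dfsB (n + 1) p = p :: vowelsB.flatMap (fun c => dfsB n (p ++ [c])) from rfl,
        PySem.List.index?_cons_of_ne _ hne]
      have hc : c ∈ vowelsB := hall c (by simp)
      have hrest : ∀ c ∈ rest', c ∈ vowelsB := fun c hm => hall c (by simp [hm])
      have hlen' : rest'.length ≤ n := by simpa using hlen
      have hown : PySem.List.index? (dfsB n (p ++ [c])) (p ++ c :: rest')
          = some (rankN n rest') := by
        have := ih (p ++ [c]) rest' hlen' hrest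
        simpa using this
      have hmem : (p ++ c :: rest') ∈ dfsB n (p ++ [c]) := by
        rw [← PySem.List.index?_isSome_iff, hown]; rfl
      have hskip : ∀ c' : Char, c' ≠ c →
          (p ++ c :: rest') ∉ dfsB n (p ++ [c']) := fun c' h => not_mem_dfsB_of_ne h n p rest'
      have hL : ∀ c' : Char, (dfsB n (p ++ [c'])).length = sizeN n := fun c' => length_dfsB n _
      simp only [vowelsB, List.flatMap_cons, List.flatMap_nil, List.append_nil] at hc ⊢
      simp only [List.mem_cons, List.not_mem_nil, or_false] at hc
      rcases hc with rfl | rfl | rfl | rfl | rfl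
      · rw [PySem.List.index?_append_of_mem _ hmem, hown]
        simp [rankN, valN]
        omega
      · rw [index?_append_right _ _ _ (hskip 'A' (by decide)),
          PySem.List.index?_append_of_mem _ hmem, hown]
        simp [rankN, valN, hL]; ring
      · rw [index?_append_right _ _ _ (hskip 'A' (by decide)),
          index?_append_right _ _ _ (hskip 'E' (by decide)),
          PySem.List.index?_append_of_mem _ hmem, hown]
        simp [rankN, valN, hL]; ring
      · rw [index?_append_right _ _ _ (hskip 'A' (by decide)),
          index?_append_right _ _ _ (hskip 'E' (by decide)),
          index?_append_right _ _ _ (hskip 'I' (by decide)),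
          PySem.List.index?_append_of_mem _ hmem, hown]
        simp [rankN, valN, hL]; ring
      · rw [index?_append_right _ _ _ (hskip 'A' (by decide)),
          index?_append_right _ _ _ (hskip 'E' (by decide)),
          index?_append_right _ _ _ (hskip 'I' (by decide)),
          index?_append_right _ _ _ (hskip 'O' (by decide)), hown]
        simp [rankN, valN, hL]; ring

lemma solution_alt_eq_rank (word : String) (h1 : ∀ c ∈ word.toList, c ∈ vowelsB)
    (h2 : word.toList.length ≤ 5) :
    solution_alt word = (rankN 5 word.toList : Int) := by
  have h := index_dfsB 5 [] word.toList h2 h1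
  simp only [List.nil_append] at h
  have hrepr : solution_alt word
      = (((PySem.List.index? (dfsB 5 []) word.toList).getD 0 : Nat) : Int) := rfl
  rw [hrepr, h]
  rfl

lemma alpha_get (c : Char) (hc : c ∈ vowelsB) :
    alphaToNum.get? c = some ((valN c : Nat) : Int) := by
  simp only [vowelsB, List.mem_cons, List.not_mem_nil, or_false] at hc
  rcases hc with rfl | rfl | rfl | rfl | rfl <;> decide

lemma weightsA_eq : weightsA = [781, 156, 31, 6, 1] := by decide

lemma solA_eq_rank (l : List Char) (h1 : ∀ c ∈ l, c ∈ vowelsB) (h2 : l.length ≤ 5) :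
    ((PySem.List.enumerate l 0).foldl
      (fun (acc : Option Int) (p : Int × Char) =>
        acc.bind (fun a => (alphaToNum.get? p.2).bind (fun v =>
          (PySem.List.pyGet? weightsA p.1).map (fun w => a + v * w + 1))))
      (some 0)).getD 0 = (rankN 5 l : Int) := by
  have w0 : PySem.List.pyGet? weightsA 0 = some 781 := by rw [weightsA_eq]; decide
  have w1 : PySem.List.pyGet? weightsA 1 = some 156 := by rw [weightsA_eq]; decide
  have w2 : PySem.List.pyGet? weightsA 2 = some 31 := by rw [weightsA_eq]; decide
  have w3 : PySem.List.pyGet? weightsA 3 = some 6 := by rw [weightsA_eq]; decide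
  have w4 : PySem.List.pyGet? weightsA 4 = some 1 := by rw [weightsA_eq]; decide
  rcases l with _ | ⟨c0, _ | ⟨c1, _ | ⟨c2, _ | ⟨c3, _ | ⟨c4, _ | ⟨c5, t⟩⟩⟩⟩⟩⟩
  · simp [rankN]
  · have v0 := alpha_get c0 (h1 c0 (by simp))
    simp [PySem.List.enumerate_cons, v0, w0, rankN, sizeN]
    ring
  · have v0 := alpha_get c0 (h1 c0 (by simp))
    have v1 := alpha_get c1 (h1 c1 (by simp))
    simp [PySem.List.enumerate_cons, v0, v1, w0, w1, rankN, sizeN]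
    ring
  · have v0 := alpha_get c0 (h1 c0 (by simp))
    have v1 := alpha_get c1 (h1 c1 (by simp))
    have v2 := alpha_get c2 (h1 c2 (by simp))
    simp [PySem.List.enumerate_cons, v0, v1, v2, w0, w1, w2, rankN, sizeN]
    ring
  · have v0 := alpha_get c0 (h1 c0 (by simp))
    have v1 := alpha_get c1 (h1 c1 (by simp))
    have v2 := alpha_get c2 (h1 c2 (by simp))
    have v3 := alpha_get c3 (h1 c3 (by simp))
    simp [PySem.List.enumerate_cons, v0, v1, v2, v3, w0, w1, w2, w3, rankN, sizeN]
    ring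
  · have v0 := alpha_get c0 (h1 c0 (by simp))
    have v1 := alpha_get c1 (h1 c1 (by simp))
    have v2 := alpha_get c2 (h1 c2 (by simp))
    have v3 := alpha_get c3 (h1 c3 (by simp))
    have v4 := alpha_get c4 (h1 c4 (by simp))
    simp [PySem.List.enumerate_cons, v0, v1, v2, v3, v4, w0, w1, w2, w3, w4, rankN, sizeN]
    ring
  · exact absurd h2 (by simp)

-- ===== VERDICT (by name: the statement is the Claim_ definition above) =====
theorem solution_spec : Claim_equal_solution := by
  intro word _ hpre
  obtain ⟨h1, h2⟩ := hpre
  have h1' : ∀ c ∈ word.toList, c ∈ vowelsB := by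
    simpa [List.all_eq_true, vowelsB] using h1
  unfold Spec_solution
  rw [solution_alt_eq_rank word h1' h2]
  exact solA_eq_rank word.toList h1' h2
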